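-- pv_equiv track=rewrite | github.com/bretgourdie/weakness-subset | weakness-subset.py | getSpecificTypes
-- ===== SOURCE A (Python) =====
-- def getSpecificTypes(dRankedWeaknessesByPoke, piMinInclusive, piMaxExclusive):
--     lSpecificTypes = []
--
--     for sPoke, lTypes in dRankedWeaknessesByPoke.items():
--         for tScoreByType in lTypes:
--             sType, iScore = tScoreByType
--
--             if iScore >= piMinInclusive and iScore < piMaxExclusive:
--                 if sType not in lSpecificTypes:
--                     lSpecificTypes.append(sType)
--
--     return lSpecificTypes
-- ===== SOURCE B (Python) =====
-- def getSpecificTypes(dRankedWeaknessesByPoke, piMinInclusive, piMaxExclusive):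
--     # stage 1: flatten the dict into one stream of in-range types (duplicates kept)
--     lStream = [sType
--                for lTypes in dRankedWeaknessesByPoke.values()
--                for sType, iScore in lTypes
--                if piMinInclusive <= iScore < piMaxExclusive]
--     # stage 2: keep an element iff it is the first occurrence in the stream,
--     # decided positionally against the input prefix (no accumulator, no output lookup)
--     return [sType for i, sType in enumerate(lStream) if sType not in lStream[:i]]
-- ===== Notes on version B (the rewrite author's own statement) =====
-- stated objective: alternative
-- what changed: B replaces A's nested loops with an inline membership test on the growing result by two comprehension stages: first flatten the dict into a filtered stream of in-range types, then select positionally those elements whose index is their first occurrence, checking against the input stream's prefix instead of the output list.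
import Mathlib
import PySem

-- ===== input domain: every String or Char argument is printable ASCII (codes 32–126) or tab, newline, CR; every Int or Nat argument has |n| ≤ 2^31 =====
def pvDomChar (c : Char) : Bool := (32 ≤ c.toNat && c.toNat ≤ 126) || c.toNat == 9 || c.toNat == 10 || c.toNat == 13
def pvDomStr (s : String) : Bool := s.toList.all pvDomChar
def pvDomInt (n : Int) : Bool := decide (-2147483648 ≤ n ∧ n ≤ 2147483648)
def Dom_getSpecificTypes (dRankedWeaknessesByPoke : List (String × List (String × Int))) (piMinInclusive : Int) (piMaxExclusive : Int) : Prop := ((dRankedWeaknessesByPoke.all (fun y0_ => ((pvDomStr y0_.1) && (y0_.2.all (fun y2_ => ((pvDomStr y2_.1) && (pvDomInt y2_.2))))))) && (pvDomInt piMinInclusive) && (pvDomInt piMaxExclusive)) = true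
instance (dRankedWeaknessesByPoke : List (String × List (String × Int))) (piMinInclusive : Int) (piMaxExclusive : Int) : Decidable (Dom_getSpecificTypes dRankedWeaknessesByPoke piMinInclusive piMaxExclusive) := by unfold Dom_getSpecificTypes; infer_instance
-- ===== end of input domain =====

-- B flattens the dict into one filtered stream and then keeps each element iff its
-- position is its first occurrence (prefix check on the input stream), instead of A's
-- nested loops with a membership test on the growing result; objective: alternative.

-- ===== PORT A =====
-- literal transliteration: nested for-loops, inline 'not in' check on the result list
def getSpecificTypes (dRankedWeaknessesByPoke : List (String × List (String × Int))) (piMinInclusive : Int) (piMaxExclusive : Int) : List String :=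
  dRankedWeaknessesByPoke.foldl (fun lSpecificTypes p =>
    p.2.foldl (fun lSpecificTypes tScoreByType =>
      if tScoreByType.2 ≥ piMinInclusive ∧ tScoreByType.2 < piMaxExclusive then
        (if tScoreByType.1 ∈ lSpecificTypes then lSpecificTypes
         else lSpecificTypes ++ [tScoreByType.1])
      else lSpecificTypes) lSpecificTypes) []

-- ===== PORT B =====
def getSpecificTypes_alt (dRankedWeaknessesByPoke : List (String × List (String × Int))) (piMinInclusive : Int) (piMaxExclusive : Int) : List String :=
  -- stage 1 comprehension: flattened, filtered stream (flatMap = nested comprehension)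
  let lStream := dRankedWeaknessesByPoke.flatMap (fun p =>
    (p.2.filter (fun q => decide (piMinInclusive ≤ q.2 ∧ q.2 < piMaxExclusive))).map Prod.fst)
  -- stage 2 comprehension: enumerate + 'sType not in lStream[:i]'
  ((PySem.List.enumerate lStream 0).filter
    (fun p => !(PySem.List.slice lStream none (some p.1)).contains p.2)).map Prod.snd

-- ===== PRECONDITION & SPEC =====
def Spec_getSpecificTypes (dRankedWeaknessesByPoke : List (String × List (String × Int))) (piMinInclusive : Int) (piMaxExclusive : Int) (out : List String) : Prop := out = getSpecificTypes_alt dRankedWeaknessesByPoke piMinInclusive piMaxExclusive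
instance (dRankedWeaknessesByPoke : List (String × List (String × Int))) (piMinInclusive : Int) (piMaxExclusive : Int) (out : List String) : Decidable (Spec_getSpecificTypes dRankedWeaknessesByPoke piMinInclusive piMaxExclusive out) := by unfold Spec_getSpecificTypes; infer_instance

-- ===== CLAIM (what is proved, stated in full; the proofs are below) =====
def Claim_equal_getSpecificTypes : Prop := ∀ (dRankedWeaknessesByPoke : List (String × List (String × Int))) (piMinInclusive : Int) (piMaxExclusive : Int), Dom_getSpecificTypes dRankedWeaknessesByPoke piMinInclusive piMaxExclusive → Spec_getSpecificTypes dRankedWeaknessesByPoke piMinInclusive piMaxExclusive (getSpecificTypes dRankedWeaknessesByPoke piMinInclusive piMaxExclusive)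

-- ===== LEMMAS AND PROOFS =====

-- the dedup step of A's inner loop
def pvStep (a : List String) (x : String) : List String :=
  if x ∈ a then a else a ++ [x]

-- A's inner fold = dedup fold of the filtered type list
theorem inner_eq (lo hi : Int) : ∀ (xs : List (String × Int)) (acc : List String),
    xs.foldl (fun a q =>
      if q.2 ≥ lo ∧ q.2 < hi then (if q.1 ∈ a then a else a ++ [q.1]) else a) acc
    = ((xs.filter (fun q => decide (lo ≤ q.2 ∧ q.2 < hi))).map Prod.fst).foldl pvStep acc := by
  intro xs
  induction xs with
  | nil => intro acc; rfl
  | cons q xs ih =>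
    intro acc
    simp only [List.foldl_cons, List.filter_cons]
    by_cases h : lo ≤ q.2 ∧ q.2 < hi
    · simp [h, ih, pvStep]
    · simp [h, ih]

-- A's nested fold = dedup fold of the flattened, filtered stream
theorem A_eq_dedup (lo hi : Int) :
    ∀ (d : List (String × List (String × Int))) (acc : List String),
    d.foldl (fun a p =>
      p.2.foldl (fun a q =>
        if q.2 ≥ lo ∧ q.2 < hi then (if q.1 ∈ a then a else a ++ [q.1]) else a) a) acc
    = (d.flatMap (fun p =>
        (p.2.filter (fun q => decide (lo ≤ q.2 ∧ q.2 < hi))).map Prod.fst)).foldl pvStep acc := by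
  intro d
  induction d with
  | nil => intro acc; rfl
  | cons p d ih =>
    intro acc
    simp only [List.foldl_cons, List.flatMap_cons, List.foldl_append]
    rw [inner_eq, ih]

-- dedup fold = first-occurrence selection against the stream's prefix
theorem dedup_char : ∀ (l pre acc : List String), (∀ x, x ∈ acc ↔ x ∈ pre) →
    l.foldl pvStep acc
    = acc ++ ((PySem.List.enumerate l (pre.length : Int)).filter
        (fun p => !((pre ++ l).take p.1.toNat).contains p.2)).map Prod.snd := by
  intro l
  induction l with
  | nil => intro pre acc _; simp [PySem.List.enumerate_nil]
  | cons x xs ih =>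
    intro pre acc hmem
    have hl : pre ++ x :: xs = (pre ++ [x]) ++ xs := by simp
    have he : PySem.List.enumerate xs ((pre.length : Int) + 1)
        = PySem.List.enumerate xs (((pre ++ [x]).length : Int)) := by
      simp
    rw [PySem.List.enumerate_cons, hl, List.filter_cons]
    by_cases hx : x ∈ pre
    · have hx' : x ∈ acc := (hmem x).mpr hx
      have hstep : pvStep acc x = acc := by simp [pvStep, hx']
      have hc : (!(((pre ++ [x]) ++ xs).take ((pre.length : Int)).toNat).contains x) = false := by
        simp [hx]
      simp only [List.foldl_cons, hstep, hc, Bool.false_eq_true]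
      rw [he, ih (pre ++ [x]) acc (by
        intro y
        simp only [List.mem_append, List.mem_singleton]
        constructor
        · intro hy; exact Or.inl ((hmem y).mp hy)
        · rintro (h | rfl)
          · exact (hmem y).mpr h
          · exact hx')]
      simp
    · have hx' : x ∉ acc := fun h => hx ((hmem x).mp h)
      have hstep : pvStep acc x = acc ++ [x] := by simp [pvStep, hx']
      have hc : (!(((pre ++ [x]) ++ xs).take ((pre.length : Int)).toNat).contains x) = true := by
        simp [hx]
      simp only [List.foldl_cons, hstep, hc, if_pos]
      rw [he, ih (pre ++ [x]) (acc ++ [x]) (by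
        intro y
        simp only [List.mem_append, List.mem_singleton]
        exact ⟨fun h => h.imp_left (hmem y).mp, fun h => h.imp_left (hmem y).mpr⟩)]
      simp

-- ===== VERDICT (by name: the statement is the Claim_ definition above) =====
theorem getSpecificTypes_spec : Claim_equal_getSpecificTypes := by
  intro d lo hi _
  show getSpecificTypes d lo hi = getSpecificTypes_alt d lo hi
  unfold getSpecificTypes getSpecificTypes_alt
  rw [A_eq_dedup]
  rw [dedup_char _ [] [] (by intro x; simp)]
  simp only [List.nil_append, List.length_nil, Int.natCast_zero]
  congr 1
  apply List.filter_congr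
  intro p hp
  obtain ⟨k, hk, rfl⟩ := (PySem.List.mem_enumerate_iff _ _ _).mp hp
  dsimp only
  rw [PySem.List.slice_to _ (by omega : (0:Int) ≤ 0 + (k:Int))]
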